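-- pv_equiv track=rewrite | github.com/cypmaster14/Numerical-Calculus | Tema3/SparseMatrix.py | compute_lines_dictionary
-- ===== SOURCE A (Python) =====
-- def compute_lines_dictionary(d, val_col):
--     lines = dict()
--     i = 0
--     val_col_length = len(val_col)
--     while i < val_col_length - 1:
--         current_line = -val_col[i][1]
--         line_list = [(d[current_line], current_line)]
--         i += 1
--         while val_col[i][0] != 0:
--             line_list.append(val_col[i])
--             i += 1
--         lines[current_line] = line_list
--     return lines
-- ===== SOURCE B (Python) =====
-- def compute_lines_dictionary(d, val_col):
--     lines = {}
--     pending = None  # (line, entries collected after its header)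
--     for idx, v in enumerate(val_col):
--         if idx == 0 or v[0] == 0:
--             if pending is not None:
--                 line, body = pending
--                 lines[line] = [(d[line], line)] + body
--             pending = (-v[1], [])
--         else:
--             pending[1].append(v)
--     return lines
-- ===== Notes on version B (the rewrite author's own statement) =====
-- stated objective: simpler
-- what changed: Replaces A's nested while loops with manual index arithmetic by a single for-pass over enumerate(val_col) that keeps one pending (line, body) segment, flushing it whenever the next header is seen and dropping the trailing sentinel segment at the end.
import Mathlib
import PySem

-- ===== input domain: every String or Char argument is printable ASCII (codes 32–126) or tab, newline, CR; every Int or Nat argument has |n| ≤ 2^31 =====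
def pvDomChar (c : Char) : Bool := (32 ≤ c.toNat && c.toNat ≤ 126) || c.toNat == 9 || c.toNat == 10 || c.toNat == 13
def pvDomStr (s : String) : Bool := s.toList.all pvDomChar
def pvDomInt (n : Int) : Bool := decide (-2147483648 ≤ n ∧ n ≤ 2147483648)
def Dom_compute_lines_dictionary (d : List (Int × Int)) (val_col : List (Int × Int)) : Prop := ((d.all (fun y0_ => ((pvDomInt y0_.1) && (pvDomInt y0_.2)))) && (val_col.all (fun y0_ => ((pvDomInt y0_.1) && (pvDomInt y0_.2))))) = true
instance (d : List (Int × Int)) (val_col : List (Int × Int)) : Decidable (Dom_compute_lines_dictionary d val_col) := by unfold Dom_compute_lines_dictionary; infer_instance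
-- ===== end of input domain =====

-- B replaces A's nested while loops and manual index arithmetic by one for-pass over
-- enumerate(val_col) carrying a pending (line, body) segment (objective: simpler).


-- ===== PORT A =====
-- inner 'while val_col[i][0] != 0' loop: builds line_list, returns the final i as well
def pvAInner (vc : List (Int × Int)) (i : Nat) (acc : List (Int × Int)) : List (Int × Int) × Nat :=
  match _h : vc[i]? with
  | none => (acc, i)                 -- Python raises IndexError here (excluded by Pre_)
  | some v => if v.1 ≠ 0 then pvAInner vc (i+1) (acc ++ [v]) else (acc, i)
termination_by vc.length - i
decreasing_by
  have : i < vc.length := (List.getElem?_eq_some_iff.mp _h).1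
  omega

theorem pvAInner_ge (vc : List (Int × Int)) (i : Nat) (acc : List (Int × Int)) :
    i ≤ (pvAInner vc i acc).2 := by
  fun_induction pvAInner vc i acc with
  | case1 => simp
  | case2 i acc v h hv ih => simpa using Nat.le_trans (by omega) ih
  | case3 => simp

-- outer 'while i < val_col_length - 1' loop over the lines dict
def pvAOuter (dd : PySem.Dict Int Int) (vc : List (Int × Int)) (i : Nat)
    (lines : PySem.Dict Int (List (Int × Int))) : PySem.Dict Int (List (Int × Int)) :=
  if _h : i < vc.length - 1 then
    let cl : Int := -((vc.getD i (0,0)).2)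
    match dd.get? cl with
    | none => lines                  -- Python raises KeyError here (excluded by Pre_)
    | some dv =>
      let r := pvAInner vc (i+1) [(dv, cl)]
      pvAOuter dd vc r.2 (lines.insert cl r.1)
  else lines
termination_by vc.length - i
decreasing_by
  have _h1 := pvAInner_ge vc (i+1) [(dv, cl)]
  have h2 := pvAInner_ge vc (i+1) [(dv, -(vc.getD i (0,0)).2)]
  omega

def compute_lines_dictionary (d : List (Int × Int)) (val_col : List (Int × Int)) :
    List (Int × List (Int × Int)) :=
  (pvAOuter (PySem.Dict.ofList d) val_col 0 PySem.Dict.empty).items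

-- ===== PORT B =====
-- 'if pending is not None: lines[line] = [(d[line], line)] + body'
def pvFlush (dd : PySem.Dict Int Int) (lines : PySem.Dict Int (List (Int × Int)))
    (pending : Option (Int × List (Int × Int))) : PySem.Dict Int (List (Int × Int)) :=
  match pending with
  | none => lines
  | some (line, body) =>
    match dd.get? line with
    | none => lines                  -- Python raises KeyError here (excluded by Pre_)
    | some dv => lines.insert line ((dv, line) :: body)

-- loop body of 'for idx, v in enumerate(val_col)'
def pvBStep (dd : PySem.Dict Int Int)
    (st : PySem.Dict Int (List (Int × Int)) × Option (Int × List (Int × Int)))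
    (p : Int × (Int × Int)) :
    PySem.Dict Int (List (Int × Int)) × Option (Int × List (Int × Int)) :=
  if p.1 == 0 || p.2.1 == 0 then
    (pvFlush dd st.1 st.2, some (-p.2.2, ([] : List (Int × Int))))
  else
    (st.1, st.2.map (fun q => (q.1, q.2 ++ [p.2])))

def compute_lines_dictionary_alt (d : List (Int × Int)) (val_col : List (Int × Int)) :
    List (Int × List (Int × Int)) :=
  ((PySem.List.enumerate val_col 0).foldl (pvBStep (PySem.Dict.ofList d))
    (PySem.Dict.empty, none)).1.items

-- ===== PRECONDITION & SPEC =====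
-- Pre_ excludes exactly the inputs on which A raises: with at least two entries, A overruns
-- the list (IndexError) unless the last entry is a header (first component 0), and raises
-- KeyError when the line of a processed header (index 0, or any zero-first entry before the
-- last index) is missing from d.
def Pre_compute_lines_dictionary (d : List (Int × Int)) (val_col : List (Int × Int)) : Prop :=
  val_col.length ≤ 1 ∨
    ((val_col.getD (val_col.length - 1) (1,0)).1 = 0 ∧
     ∀ j < val_col.length - 1, (j = 0 ∨ (val_col.getD j (1,0)).1 = 0) →
       (PySem.Dict.ofList d).contains (-(val_col.getD j (0,0)).2) = true)
instance (d : List (Int × Int)) (val_col : List (Int × Int)) :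
    Decidable (Pre_compute_lines_dictionary d val_col) := by
  unfold Pre_compute_lines_dictionary; infer_instance

def pvWitness_compute_lines_dictionary : (List (Int × Int)) × (List (Int × Int)) :=
  ([(1, 7)], [(2, -1), (0, 0)])

def Spec_compute_lines_dictionary (d : List (Int × Int)) (val_col : List (Int × Int))
    (out : List (Int × List (Int × Int))) : Prop :=
  out = compute_lines_dictionary_alt d val_col
instance (d : List (Int × Int)) (val_col : List (Int × Int)) (out : List (Int × List (Int × Int))) :
    Decidable (Spec_compute_lines_dictionary d val_col out) := by
  unfold Spec_compute_lines_dictionary; infer_instance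

-- ===== CLAIM (what is proved, stated in full; the proofs are below) =====
def Claim_equal_compute_lines_dictionary : Prop :=
  ∀ (d : List (Int × Int)) (val_col : List (Int × Int)),
    Dom_compute_lines_dictionary d val_col → Pre_compute_lines_dictionary d val_col →
    Spec_compute_lines_dictionary d val_col (compute_lines_dictionary d val_col)

-- ===== LEMMAS AND PROOFS =====

theorem pvAInner_step_some (vc : List (Int × Int)) (i : Nat) (acc : List (Int × Int))
    (v : Int × Int) (h : vc[i]? = some v) :
    pvAInner vc i acc = if v.1 ≠ 0 then pvAInner vc (i+1) (acc ++ [v]) else (acc, i) := by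
  rw [pvAInner]
  split
  · rename_i h'; simp [h'] at h
  · rename_i w h'; rw [h'] at h; injection h with h; subst h; rfl

theorem getD_eq_getElem' (l : List (Int × Int)) (n : Nat) (h : n < l.length) (d : Int × Int) :
    l.getD n d = l[n] := by
  simp [List.getD_eq_getElem?_getD, List.getElem?_eq_getElem h]

-- the inner while loop stops at the first zero-first entry j, collecting vc[i:j]
theorem pvAInner_stop (vc : List (Int × Int)) :
    ∀ (n i j : Nat) (acc : List (Int × Int)), j - i ≤ n → i ≤ j → j < vc.length →
    (∀ m, i ≤ m → m < j → (vc.getD m (1,0)).1 ≠ 0) → (vc.getD j (1,0)).1 = 0 →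
    pvAInner vc i acc = (acc ++ (vc.drop i).take (j - i), j) := by
  intro n
  induction n with
  | zero =>
    intro i j acc hn hij hj _hmid hz
    have hji : i = j := by omega
    subst hji
    rw [pvAInner_step_some vc i acc vc[i] (List.getElem?_eq_getElem hj)]
    rw [getD_eq_getElem' vc i hj] at hz
    simp [hz]
  | succ n ih =>
    intro i j acc hn hij hj hmid hz
    by_cases hij' : i = j
    · subst hij'
      rw [pvAInner_step_some vc i acc vc[i] (List.getElem?_eq_getElem hj)]
      rw [getD_eq_getElem' vc i hj] at hz
      simp [hz]
    · have hilt : i < j := by omega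
      have hi : i < vc.length := by omega
      rw [pvAInner_step_some vc i acc vc[i] (List.getElem?_eq_getElem hi)]
      have hne : vc[i].1 ≠ 0 := by
        have := hmid i (le_refl i) hilt
        rwa [getD_eq_getElem' vc i hi] at this
      rw [if_pos hne]
      rw [ih (i+1) j (acc ++ [vc[i]]) (by omega) (by omega) hj
        (fun m hm1 hm2 => hmid m (by omega) hm2) hz]
      have htake : (vc.drop i).take (j - i) = vc[i] :: (vc.drop (i+1)).take (j - (i+1)) := by
        rw [List.drop_eq_getElem_cons hi]
        have : j - i = (j - (i+1)) + 1 := by omega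
        rw [this, List.take_succ_cons]
      rw [htake]
      simp

-- B's fold over a run of non-header entries only extends the pending body
theorem pvBfold_mid (dd : PySem.Dict Int Int) :
    ∀ (mid : List (Int × Int)) (s : Int) (lines : PySem.Dict Int (List (Int × Int)))
      (pend : Int × List (Int × Int)), 0 < s → (∀ v ∈ mid, v.1 ≠ 0) →
    (PySem.List.enumerate mid s).foldl (pvBStep dd) (lines, some pend) =
      (lines, some (pend.1, pend.2 ++ mid)) := by
  intro mid
  induction mid with
  | nil => intro s lines pend _ _; simp [PySem.List.enumerate_nil]
  | cons v mid ih =>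
    intro s lines pend hs hmid
    rw [PySem.List.enumerate_cons, List.foldl_cons]
    have hstep : pvBStep dd (lines, some pend) (s, v) =
        (lines, some (pend.1, pend.2 ++ [v])) := by
      have hs0 : (s == 0) = false := by simp; omega
      have hv0 : (v.1 == 0) = false := by simp [hmid v (by simp)]
      simp [pvBStep, hs0, hv0]
    rw [hstep, ih (s+1) lines (pend.1, pend.2 ++ [v]) (by omega)
      (fun w hw => hmid w (by simp [hw]))]
    simp

theorem pvMain (dd : PySem.Dict Int Int) (vc : List (Int × Int))
    (hlast : (vc.getD (vc.length - 1) (1,0)).1 = 0)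
    (hkeys : ∀ j < vc.length - 1, (j = 0 ∨ (vc.getD j (1,0)).1 = 0) →
      dd.contains (-(vc.getD j (0,0)).2) = true) :
    ∀ (n i : Nat) (lines : PySem.Dict Int (List (Int × Int))), vc.length - i ≤ n →
    i < vc.length → (i = 0 ∨ (vc.getD i (1,0)).1 = 0) →
    pvAOuter dd vc i lines =
      ((PySem.List.enumerate (vc.drop i) (i : Int)).foldl (pvBStep dd) (lines, none)).1 := by
  intro n
  induction n with
  | zero => intro i lines hn hi _; omega
  | succ n ih =>
    intro i lines hn hi hhdr
    by_cases hlt : i < vc.length - 1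
    · -- a header segment is processed; it ends at the next zero-first entry j
      have hP : ∃ m, i < m ∧ m < vc.length ∧ (vc.getD m (1,0)).1 = 0 :=
        ⟨vc.length - 1, by omega, by omega, hlast⟩
      set j := Nat.find hP with hjdef
      obtain ⟨hij, hjlen, hjz⟩ := Nat.find_spec hP
      have hjmin : ∀ m, i < m → m < j → (vc.getD m (1,0)).1 ≠ 0 := by
        intro m hm1 hm2 hz
        exact Nat.find_min hP hm2 ⟨hm1, by omega, hz⟩
      set cl : Int := -((vc.getD i (0,0)).2) with hcl
      obtain ⟨dv, hdv⟩ : ∃ dv, dd.get? cl = some dv := by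
        have hc := hkeys i hlt hhdr
        rw [PySem.Dict.contains_eq_isSome_get?] at hc
        exact Option.isSome_iff_exists.mp hc
      set mid : List (Int × Int) := (vc.drop (i+1)).take (j - (i+1)) with hmiddef
      have hmidlen : mid.length = j - (i+1) := by
        simp [hmiddef]; omega
      have hinner : pvAInner vc (i+1) [(dv, cl)] = ((dv, cl) :: mid, j) := by
        rw [pvAInner_stop vc j (i+1) j [(dv, cl)] (by omega) (by omega) hjlen
          (fun m hm1 hm2 => hjmin m (by omega) hm2) hjz]
        simp [hmiddef]
      -- unfold one step of A's outer loop
      rw [pvAOuter]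
      rw [dif_pos hlt]
      simp only [← hcl, hdv, hinner]
      -- decompose the suffix behind index i: vc.drop i = vc[i] :: (mid ++ vc.drop j)
      have hdropi : vc.drop i = vc[i] :: (mid ++ vc.drop j) := by
        rw [List.drop_eq_getElem_cons hi]
        congr 1
        rw [hmiddef]
        have := List.take_append_drop (j - (i+1)) (vc.drop (i+1))
        rw [List.drop_drop] at this
        have harg : i + 1 + (j - (i+1)) = j := by omega
        rw [harg] at this
        exact this.symm
      have hmidne : ∀ v ∈ mid, v.1 ≠ 0 := by
        intro v hv
        obtain ⟨k, hk, hvk⟩ := List.mem_iff_getElem.mp hv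
        have hk' : k < j - (i+1) := by omega
        have hidx : i + 1 + k < vc.length := by omega
        have h1 : (List.take (j - (i+1)) (List.drop (i+1) vc))[k]? = some v := by
          rw [← hmiddef, List.getElem?_eq_getElem hk, hvk]
        simp only [List.getElem?_take, hk', if_pos, List.getElem?_drop] at h1
        rw [List.getElem?_eq_getElem hidx] at h1
        injection h1 with h1
        rw [← h1]
        have := hjmin (i+1+k) (by omega) (by omega)
        rwa [getD_eq_getElem' vc (i+1+k) hidx] at this
      -- run B over the header, the mid区segment, then use the IH at j
      rw [hdropi, PySem.List.enumerate_cons, List.foldl_cons]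
      have hcast1 : (i : Int) + 1 = ((i+1 : Nat) : Int) := by push_cast; ring
      have hstep1 : pvBStep dd (lines, none) ((i : Int), vc[i]) = (lines, some (cl, [])) := by
        have hcond : (((i : Int) == 0) || (vc[i].1 == 0)) = true := by
          rcases hhdr with h0 | hz
          · subst h0; simp
          · rw [getD_eq_getElem' vc i hi] at hz; simp [hz]
        simp [pvBStep, hcond, pvFlush, hcl, List.getElem?_eq_getElem hi]
      rw [hstep1, PySem.List.enumerate_append, List.foldl_append]
      rw [pvBfold_mid dd mid ((i : Int) + 1) lines (cl, []) (by omega) hmidne]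
      simp only [List.nil_append]
      have hcast2 : (i : Int) + 1 + (mid.length : Int) = (j : Int) := by
        rw [hmidlen]; omega
      rw [hcast2]
      -- both folds take one step on the header at j and reach the same state
      have hdropj : vc.drop j = vc[j] :: vc.drop (j+1) := List.drop_eq_getElem_cons hjlen
      have hjz' : vc[j].1 = 0 := by rwa [getD_eq_getElem' vc j hjlen] at hjz
      have hstepA : pvBStep dd (lines, some (cl, mid)) ((j : Int), vc[j]) =
          (lines.insert cl ((dv, cl) :: mid), some (-vc[j].2, [])) := by
        simp [pvBStep, hjz', pvFlush, hdv]
      have hstepB : pvBStep dd (lines.insert cl ((dv, cl) :: mid), none) ((j : Int), vc[j]) =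
          (lines.insert cl ((dv, cl) :: mid), some (-vc[j].2, [])) := by
        simp [pvBStep, hjz', pvFlush]
      rw [ih j (lines.insert cl ((dv, cl) :: mid)) (by omega) hjlen
        (Or.inr hjz)]
      rw [hdropj, PySem.List.enumerate_cons, List.foldl_cons, List.foldl_cons,
        hstepA, hstepB]
    · -- i = len - 1: A stops; B sees only the final header, whose pending segment is dropped
      have hieq : i = vc.length - 1 := by omega
      have hdropi : vc.drop i = [vc[i]] := by
        rw [List.drop_eq_getElem_cons hi]
        have : vc.drop (i+1) = [] := List.drop_of_length_le (by omega)
        rw [this]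
      rw [pvAOuter, dif_neg hlt, hdropi, PySem.List.enumerate_cons,
        PySem.List.enumerate_nil]
      simp only [List.foldl_cons, List.foldl_nil]
      unfold pvBStep
      split
      · simp [pvFlush]
      · simp

-- ===== VERDICT (by name: the statement is the Claim_ definition above) =====
theorem compute_lines_dictionary_spec : Claim_equal_compute_lines_dictionary := by
  intro d vc _dom hpre
  unfold Spec_compute_lines_dictionary compute_lines_dictionary compute_lines_dictionary_alt
  rcases hpre with hle | ⟨hlast, hkeys⟩
  · -- at most one entry: A's outer loop never runs, B never flushes
    rcases vc with _ | ⟨v, rest⟩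
    · rw [pvAOuter, dif_neg (by simp)]
      simp [PySem.List.enumerate_nil]
    · rcases rest with _ | ⟨w, rest'⟩
      case cons.cons => simp at hle
      rw [pvAOuter, dif_neg (by simp)]
      rw [PySem.List.enumerate_cons, PySem.List.enumerate_nil]
      simp only [List.foldl_cons, List.foldl_nil]
      unfold pvBStep
      split
      · simp [pvFlush]
      · simp
  · rcases vc with _ | ⟨v, rest⟩
    · rw [pvAOuter, dif_neg (by simp)]
      simp [PySem.List.enumerate_nil]
    · have h := pvMain (PySem.Dict.ofList d) (v :: rest) hlast hkeys
        (v :: rest).length 0 PySem.Dict.empty (by omega) (by simp) (Or.inl rfl)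
      rw [List.drop_zero] at h
      rw [h]
      norm_num
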